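-- pv_equiv track=rewrite | github.com/jakehoare/leetcode | 544_Output_Contest_Matches.py | findContestMatch
-- ===== SOURCE A (Python) =====
-- def findContestMatch(n):
--     """
--     :type n: int
--     :rtype: str
--     """
--     result = [str(i) for i in range(1, n + 1)]
--
--     while len(result) > 1:
--         new_result = []
--         for i in range(len(result) // 2):
--             new_result.append("(" + result[i] + "," + result[len(result) - i - 1] + ")")
--         result = new_result
--
--     return result[0]
-- ===== SOURCE B (Python) =====
-- def findContestMatch(n):
--     # Recursive divide-and-conquer: precompute the chain of bracket sizes,
--     # then build the nested string top-down without intermediate string lists.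
--     chain = []
--     m = n
--     while m > 1:
--         chain.append(m)
--         m //= 2
--
--     def build(k, p):
--         if k == 0:
--             return str(p + 1)
--         m = chain[k - 1]
--         return "(" + build(k - 1, p) + "," + build(k - 1, m - 1 - p) + ")"
--
--     return build(len(chain), 0)
-- ===== Notes on version B (the rewrite author's own statement) =====
-- stated objective: alternative
-- what changed: A repeatedly rebuilds a shrinking list of partial strings, pairing i with len-1-i each round; B precomputes the chain of round sizes and builds the nested string in one top-down divide-and-conquer recursion with no intermediate lists.
-- outside the precondition, e.g. on findContestMatch(0): A raises IndexError, B returns '1'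
import Mathlib
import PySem

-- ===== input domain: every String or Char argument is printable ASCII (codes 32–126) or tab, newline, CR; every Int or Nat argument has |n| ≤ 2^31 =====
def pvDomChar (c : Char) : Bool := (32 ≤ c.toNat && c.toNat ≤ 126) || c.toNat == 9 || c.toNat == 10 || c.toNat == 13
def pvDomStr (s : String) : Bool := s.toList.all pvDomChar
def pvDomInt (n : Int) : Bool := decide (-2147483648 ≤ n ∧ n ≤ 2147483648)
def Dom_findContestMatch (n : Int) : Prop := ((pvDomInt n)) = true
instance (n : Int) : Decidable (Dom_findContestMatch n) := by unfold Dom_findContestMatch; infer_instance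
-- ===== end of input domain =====

-- B replaces A's round-by-round list rebuilding with a single top-down recursion over the
-- precomputed chain of bracket sizes (objective: alternative algorithm, no intermediate lists).

-- ===== PORT A =====
-- one pass of A's while-loop body: pair result[i] with result[len-i-1] for i in range(len//2)
def roundA (L : List String) : List String :=
  (List.range (L.length / 2)).map
    (fun i => "(" ++ L.getD i "" ++ "," ++ L.getD (L.length - i - 1) "" ++ ")")

-- A's while loop
def loopA (L : List String) : List String :=
  if _h : L.length > 1 then loopA (roundA L) else L
termination_by L.length
decreasing_by simp [roundA]; omega

-- result[0]; Python raises IndexError when the list is empty (n ≤ 0) — excluded by Pre_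
def findContestMatch (n : Int) : String :=
  (loopA ((PySem.List.pyRange 1 (n + 1) 1).map PySem.Int.toStr)).headD ""

-- ===== PORT B =====
-- B's first while loop: chain = [n, n//2, n//4, ..., 2]
def chainB (m : Int) : List Int :=
  if _h : m > 1 then m :: chainB (PySem.Int.floordiv m 2) else []
termination_by m.toNat
decreasing_by
  rw [PySem.Int.floordiv_eq_ediv_of_pos (by omega)]; omega

-- B's recursive build(k, p)
def buildB (chain : List Int) (k : Nat) (p : Int) : String :=
  match k with
  | 0 => PySem.Int.toStr (p + 1)
  | Nat.succ k => "(" ++ buildB chain k p ++ "," ++ buildB chain k (chain.getD k 0 - 1 - p) ++ ")"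

def findContestMatch_alt (n : Int) : String :=
  buildB (chainB n) (chainB n).length 0

-- ===== PRECONDITION & SPEC =====
-- Pre_ excludes exactly n ≤ 0, where A raises IndexError on result[0] (empty list).
def Pre_findContestMatch (n : Int) : Prop := 1 ≤ n
instance (n : Int) : Decidable (Pre_findContestMatch n) := by unfold Pre_findContestMatch; infer_instance

def pvWitness_findContestMatch : Int := (6)

def Spec_findContestMatch (n : Int) (out : String) : Prop := out = findContestMatch_alt n
instance (n : Int) (out : String) : Decidable (Spec_findContestMatch n out) := by unfold Spec_findContestMatch; infer_instance

-- ===== CLAIM (what is proved, stated in full; the proofs are below) =====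
def Claim_equal_findContestMatch : Prop := ∀ (n : Int), Dom_findContestMatch n → Pre_findContestMatch n → Spec_findContestMatch n (findContestMatch n)

-- ===== LEMMAS AND PROOFS =====

-- buildB with a generic leaf-labelling function (proof device)
def buildG (chain : List Int) (k : Nat) (f : Int → String) (p : Int) : String :=
  match k with
  | 0 => f p
  | Nat.succ k => "(" ++ buildG chain k f p ++ "," ++ buildG chain k f (chain.getD k 0 - 1 - p) ++ ")"

lemma buildG_eq_buildB (c : List Int) (k : Nat) (p : Int) :
    buildG c k (fun q => PySem.Int.toStr (q + 1)) p = buildB c k p := by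
  induction k generalizing p with
  | zero => rfl
  | succ k ih => simp [buildG, buildB, ih]

-- prepending m to the chain = absorbing one pairing level into the leaf labels
lemma buildG_cons (k : Nat) (m : Int) (c : List Int) (f : Int → String) (p : Int) :
    buildG (m :: c) (k + 1) f p
      = buildG c k (fun q => "(" ++ f q ++ "," ++ f (m - 1 - q) ++ ")") p := by
  induction k generalizing p with
  | zero => simp [buildG]
  | succ k ih =>
    have h1 : buildG (m :: c) (k + 1 + 1) f p
        = "(" ++ buildG (m :: c) (k + 1) f p ++ ","
            ++ buildG (m :: c) (k + 1) f ((m :: c).getD (k + 1) 0 - 1 - p) ++ ")" := rfl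
    have h2 : (m :: c).getD (k + 1) 0 = c.getD k 0 := rfl
    rw [h1, h2, ih, ih]
    rfl

lemma length_roundA (L : List String) : (roundA L).length = L.length / 2 := by
  simp [roundA]

lemma getD_roundA (L : List String) (j : Nat) (hj : j < L.length / 2) :
    (roundA L).getD j ""
      = "(" ++ L.getD j "" ++ "," ++ L.getD (L.length - j - 1) "" ++ ")" := by
  simp [roundA, List.getD, hj]

-- key invariant: A's loop on any label list L of length m computes B's nested build
lemma key (m : Int) (hm : 1 ≤ m) (L : List String) (f : Int → String)
    (hlen : L.length = m.toNat)
    (hf : ∀ p : Int, 0 ≤ p → p < m → L.getD p.toNat "" = f p) :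
    loopA L = [buildG (chainB m) (chainB m).length f 0] := by
  by_cases h1 : m > 1
  · -- recursive case
    have hm2 : (1 : Int) ≤ PySem.Int.floordiv m 2 := by
      rw [PySem.Int.floordiv_eq_ediv_of_pos (by omega)]; omega
    have hfd : PySem.Int.floordiv m 2 = m / 2 :=
      PySem.Int.floordiv_eq_ediv_of_pos (by omega)
    have hlen' : (roundA L).length = (PySem.Int.floordiv m 2).toNat := by
      rw [length_roundA, hlen, hfd]; omega
    have hrec := key (PySem.Int.floordiv m 2) hm2 (roundA L)
      (fun q => "(" ++ f q ++ "," ++ f (m - 1 - q) ++ ")") hlen' ?_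
    · have hL1 : L.length > 1 := by omega
      rw [loopA, dif_pos hL1, hrec]
      rw [show chainB m = m :: chainB (PySem.Int.floordiv m 2) from by
        rw [chainB]; simp [h1]]
      simp only [List.length_cons]
      rw [buildG_cons]
    · intro p hp0 hpm
      have hj : p.toNat < L.length / 2 := by
        rw [hfd] at hpm hm2; omega
      rw [getD_roundA L p.toNat hj]
      have e1 : L.getD p.toNat "" = f p := hf p hp0 (by rw [hfd] at hpm; omega)
      have e2 : L.getD (L.length - p.toNat - 1) "" = f (m - 1 - p) := by
        have : L.length - p.toNat - 1 = (m - 1 - p).toNat := by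
          rw [hfd] at hpm; omega
        rw [this]
        exact hf (m - 1 - p) (by rw [hfd] at hpm; omega) (by omega)
      rw [e1, e2]
  · -- base case: m = 1
    have hm1 : m = 1 := by omega
    subst hm1
    have : L.length = 1 := by simpa using hlen
    obtain ⟨x, hx⟩ : ∃ x, L = [x] := by
      match L, this with | [x], _ => exact ⟨x, rfl⟩
    subst hx
    have hx0 : x = f 0 := by simpa using hf 0 le_rfl (by norm_num)
    rw [loopA, dif_neg (by simp)]
    rw [chainB, dif_neg (by omega)]
    simp [buildG, hx0]
termination_by m.toNat
decreasing_by rw [PySem.Int.floordiv_eq_ediv_of_pos (by omega)]; omega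

lemma getD_init (n : Int) (p : Int) (hp0 : 0 ≤ p) (hpn : p < n) :
    ((PySem.List.pyRange 1 (n + 1) 1).map PySem.Int.toStr).getD p.toNat ""
      = PySem.Int.toStr (p + 1) := by
  rw [PySem.List.pyRange_one]
  have hlt : p.toNat < ((n + 1) - 1).toNat := by omega
  simp only [List.map_map, List.getD, List.getElem?_map, List.getElem?_range, hlt,
    if_pos hlt, Option.map_some, Option.getD_some, Function.comp]
  congr 1
  omega

-- ===== VERDICT (by name: the statement is the Claim_ definition above) =====
theorem findContestMatch_spec : Claim_equal_findContestMatch := by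
  intro n _hd hn
  unfold Spec_findContestMatch findContestMatch findContestMatch_alt
  have hlen : ((PySem.List.pyRange 1 (n + 1) 1).map PySem.Int.toStr).length = n.toNat := by
    simp [PySem.List.length_pyRange_one]
  have := key n hn ((PySem.List.pyRange 1 (n + 1) 1).map PySem.Int.toStr)
    (fun q => PySem.Int.toStr (q + 1)) hlen
    (fun p hp0 hpn => getD_init n p hp0 hpn)
  rw [this, List.headD_cons, buildG_eq_buildB]
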